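-- pv_equiv track=rewrite | github.com/sabyunrepo/Hack-so42ety | backend/features/storybook/tasks/core.py | _restructure_dialogues
-- ===== SOURCE A (Python) =====
-- def _restructure_dialogues(dialogues: list, flat_emotions: list) -> list:
--     """Emotion을 원본 페이지 구조에 맞게 재구성"""
--     page_sizes = [len(page) for page in dialogues]
--     result = []
--     idx = 0
--     for size in page_sizes:
--         result.append(flat_emotions[idx : idx + size])
--         idx += size
--     return result
-- ===== SOURCE B (Python) =====
-- _MISSING = object()
--
-- def _restructure_dialogues(dialogues: list, flat_emotions: list) -> list:
--     """Emotion을 원본 페이지 구조에 맞게 재구성"""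
--     it = iter(flat_emotions)
--     result = []
--     for page in dialogues:
--         chunk = []
--         for _ in page:
--             item = next(it, _MISSING)
--             if item is _MISSING:
--                 break
--             chunk.append(item)
--         result.append(chunk)
--     return result
-- ===== Notes on version B (the rewrite author's own statement) =====
-- stated objective: alternative
-- what changed: B discards index arithmetic and slicing entirely: it consumes flat_emotions through a single iterator, taking one element per dialogue line (stopping gracefully when exhausted), so the data itself is traversed once element-by-element instead of being sliced by computed offsets.
import Mathlib
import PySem

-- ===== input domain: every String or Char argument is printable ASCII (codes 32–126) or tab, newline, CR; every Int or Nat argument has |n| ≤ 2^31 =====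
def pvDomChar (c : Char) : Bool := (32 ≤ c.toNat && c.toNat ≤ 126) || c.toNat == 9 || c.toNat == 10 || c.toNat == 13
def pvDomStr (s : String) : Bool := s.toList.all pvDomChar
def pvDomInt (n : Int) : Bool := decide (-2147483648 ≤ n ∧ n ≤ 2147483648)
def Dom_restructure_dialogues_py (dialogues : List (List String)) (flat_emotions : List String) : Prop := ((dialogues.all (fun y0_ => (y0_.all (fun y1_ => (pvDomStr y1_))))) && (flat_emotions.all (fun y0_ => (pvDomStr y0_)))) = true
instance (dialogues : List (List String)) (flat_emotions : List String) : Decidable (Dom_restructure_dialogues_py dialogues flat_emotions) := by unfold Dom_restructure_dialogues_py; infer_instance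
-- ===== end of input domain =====

-- B replaces A's offset/slice bookkeeping with a single iterator over flat_emotions,
-- consumed one element per dialogue line (alternative decomposition; same cost).

-- ===== PORT A =====
-- page_sizes = [len(page) for page in dialogues]; loop with running idx, slicing flat_emotions[idx:idx+size]
def restructure_dialogues_py (dialogues : List (List String)) (flat_emotions : List String) : List (List String) :=
  let page_sizes : List Int := dialogues.map (fun page => (page.length : Int))
  (page_sizes.foldl
    (fun (st : List (List String) × Int) size =>
      (st.1 ++ [PySem.List.slice flat_emotions (some st.2) (some (st.2 + size))], st.2 + size))
    ([], 0)).1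

-- ===== PORT B =====
-- inner loop of B: for _ in page: item = next(it, MISSING); if MISSING: break; chunk.append(item)
-- state = (chunk built so far is the first component, remaining iterator contents the second)
def pvNextChunk : List String → List String → List String × List String
  | [], rem => ([], rem)
  | _ :: _, [] => ([], [])                           -- next(it) exhausted: break
  | _ :: ps, r :: rs =>
      let st := pvNextChunk ps rs
      (r :: st.1, st.2)

-- it = iter(flat_emotions); for page: consume one item per line, append chunk
def restructure_dialogues_py_alt (dialogues : List (List String)) (flat_emotions : List String) : List (List String) :=
  (dialogues.foldl
    (fun (st : List (List String) × List String) page =>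
      let c := pvNextChunk page st.2
      (st.1 ++ [c.1], c.2))
    ([], flat_emotions)).1

-- ===== PRECONDITION & SPEC =====
def Spec_restructure_dialogues_py (dialogues : List (List String)) (flat_emotions : List String) (out : List (List String)) : Prop := out = restructure_dialogues_py_alt dialogues flat_emotions
instance (dialogues : List (List String)) (flat_emotions : List String) (out : List (List String)) : Decidable (Spec_restructure_dialogues_py dialogues flat_emotions out) := by unfold Spec_restructure_dialogues_py; infer_instance

-- ===== CLAIM (what is proved, stated in full; the proofs are below) =====
def Claim_equal_restructure_dialogues_py : Prop := ∀ (dialogues : List (List String)) (flat_emotions : List String), Dom_restructure_dialogues_py dialogues flat_emotions → Spec_restructure_dialogues_py dialogues flat_emotions (restructure_dialogues_py dialogues flat_emotions)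

-- ===== LEMMAS AND PROOFS =====

-- common reference: chunk list by take/drop
def pvSpecChunks : List (List String) → List String → List (List String)
  | [], _ => []
  | p :: rest, flat => flat.take p.length :: pvSpecChunks rest (flat.drop p.length)

theorem pvNextChunk_eq (ps rem : List String) :
    pvNextChunk ps rem = (rem.take ps.length, rem.drop ps.length) := by
  induction ps generalizing rem with
  | nil => simp [pvNextChunk]
  | cons p ps ih =>
      cases rem with
      | nil => simp [pvNextChunk]
      | cons r rs => simp [pvNextChunk, ih]

theorem pvB_fold (ds : List (List String)) (acc : List (List String)) (rem : List String) :
    (ds.foldl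
      (fun (st : List (List String) × List String) page =>
        let c := pvNextChunk page st.2
        (st.1 ++ [c.1], c.2))
      (acc, rem)).1 = acc ++ pvSpecChunks ds rem := by
  induction ds generalizing acc rem with
  | nil => simp [pvSpecChunks]
  | cons p rest ih =>
      simp only [List.foldl, pvSpecChunks]
      rw [ih, pvNextChunk_eq]
      simp

theorem pvA_fold (flat : List String) (ds : List (List String)) (acc : List (List String)) (k : Nat) :
    ((ds.map (fun page => (page.length : Int))).foldl
      (fun (st : List (List String) × Int) size =>
        (st.1 ++ [PySem.List.slice flat (some st.2) (some (st.2 + size))], st.2 + size))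
      (acc, (k : Int))).1 = acc ++ pvSpecChunks ds (flat.drop k) := by
  induction ds generalizing acc k with
  | nil => simp [pvSpecChunks]
  | cons p rest ih =>
      simp only [List.map, List.foldl, pvSpecChunks]
      have hslice : PySem.List.slice flat (some (k : Int)) (some ((k : Int) + (p.length : Int)))
          = (flat.drop k).take p.length := PySem.List.slice_natCast_add flat k p.length
      have hcast : ((k : Int) + (p.length : Int)) = ((k + p.length : Nat) : Int) := by push_cast; ring
      rw [hslice, hcast, ih]
      simp [List.drop_drop]  -- drop k then drop len = drop (k+len)

-- ===== VERDICT (by name: the statement is the Claim_ definition above) =====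
theorem restructure_dialogues_py_spec : Claim_equal_restructure_dialogues_py := by
  intro ds flat _
  show restructure_dialogues_py ds flat = restructure_dialogues_py_alt ds flat
  unfold restructure_dialogues_py restructure_dialogues_py_alt
  have ha := pvA_fold flat ds [] 0
  have hb := pvB_fold ds [] flat
  simp only [Int.natCast_zero, List.drop_zero, List.nil_append] at ha hb
  simpa [ha] using hb.symm
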